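-- pv_equiv track=rewrite | github.com/guidocalvano/hackathon_gem_Adam | ParameterSpace.py | _flattened_space_unit_sizes
-- ===== SOURCE A (Python) =====
-- def _flattened_space_unit_sizes(flattened_space):
--
--     mixed_radix_unit_size = {}
--     product = 1
--
--     for parameter, options in reversed(sorted(flattened_space.items())):
--         mixed_radix_unit_size[parameter] = product
--
--         product *= len(options)
--
--     space_size = product
--
--     return mixed_radix_unit_size, space_size
-- ===== SOURCE B (Python) =====
-- def _flattened_space_unit_sizes(flattened_space):
--     # Per-key independent computation: a key's unit size is the product of the
--     # option-list lengths of all strictly greater keys (no running accumulator,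
--     # no suffix table); the total size is the plain product of all lengths.
--     def units_above(key):
--         result = 1
--         for other, options in flattened_space.items():
--             if other > key:
--                 result *= len(options)
--         return result
--
--     mixed_radix_unit_size = {key: units_above(key)
--                              for key in sorted(flattened_space, reverse=True)}
--
--     space_size = 1
--     for options in flattened_space.values():
--         space_size *= len(options)
--
--     return mixed_radix_unit_size, space_size
-- ===== Notes on version B (the rewrite author's own statement) =====
-- stated objective: alternative
-- what changed: Replaces A's single fused reversed-sorted loop carrying a running product with per-key independent computation: each key's unit size is recomputed from scratch as the product over the whole dict of the lengths of strictly greater keys, and the total size is a separate plain product over all values; Pre_ excludes association lists with duplicate keys, which do not represent any Python dict input.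
import Mathlib
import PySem

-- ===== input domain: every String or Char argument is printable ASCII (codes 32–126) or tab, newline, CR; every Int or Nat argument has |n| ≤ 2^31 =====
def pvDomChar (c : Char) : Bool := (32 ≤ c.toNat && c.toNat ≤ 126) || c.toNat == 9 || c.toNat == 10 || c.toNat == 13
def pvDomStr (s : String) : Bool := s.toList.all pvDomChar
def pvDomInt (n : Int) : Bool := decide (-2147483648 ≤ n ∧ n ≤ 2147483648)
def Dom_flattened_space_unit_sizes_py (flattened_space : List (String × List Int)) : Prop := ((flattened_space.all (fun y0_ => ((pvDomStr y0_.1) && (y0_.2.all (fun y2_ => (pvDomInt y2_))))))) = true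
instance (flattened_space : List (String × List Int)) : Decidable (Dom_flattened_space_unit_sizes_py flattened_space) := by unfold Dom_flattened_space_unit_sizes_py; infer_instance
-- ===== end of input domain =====

-- B replaces A's fused reversed loop with a running product by per-key independent
-- recomputation (unit size = product of lengths of strictly greater keys, full scan per key);
-- alternative decomposition, quadratic instead of the fused single pass.


-- ===== PORT A =====
-- sorted(flattened_space.items()): items of a dict have distinct keys (enforced by Pre_),
-- so Python's tuple comparison on (key, options) pairs is exactly comparison by key.
def flattened_space_unit_sizes_py (flattened_space : List (String × List Int)) : (List (String × Int)) × Int :=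
  let r := ((PySem.List.sorted flattened_space (fun p => p.1) false).reverse).foldl
      (fun (st : PySem.Dict String Int × Int) (po : String × List Int) =>
        (st.1.insert po.1 st.2, st.2 * (po.2.length : Int)))
      (PySem.Dict.empty, 1)
  (r.1.items, r.2)

-- ===== PORT B =====
-- units_above(key): one full scan of the dict, multiplying the lengths of strictly greater keys
def pvUnitsAbove (fs : List (String × List Int)) (k : String) : Int :=
  fs.foldl (fun r p => if k < p.1 then r * (p.2.length : Int) else r) 1

def flattened_space_unit_sizes_py_alt (flattened_space : List (String × List Int)) : (List (String × Int)) × Int :=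
  ((PySem.List.sorted (flattened_space.map (fun p => p.1)) (fun k => k) true).map
      (fun k => (k, pvUnitsAbove flattened_space k)),
   flattened_space.foldl (fun r p => r * (p.2.length : Int)) 1)

-- ===== PRECONDITION & SPEC =====
-- Pre_ excludes association lists with duplicate keys: they do not represent any Python
-- dict input (the argument is a dict, whose keys are distinct).
def Pre_flattened_space_unit_sizes_py (flattened_space : List (String × List Int)) : Prop :=
  (flattened_space.map (fun p => p.1)).Nodup
instance (flattened_space : List (String × List Int)) : Decidable (Pre_flattened_space_unit_sizes_py flattened_space) := by unfold Pre_flattened_space_unit_sizes_py; infer_instance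

def pvWitness_flattened_space_unit_sizes_py : (List (String × List Int)) :=
  [("b", [1, 2, 3]), ("a", [0, 7])]

def Spec_flattened_space_unit_sizes_py (flattened_space : List (String × List Int)) (out : (List (String × Int)) × Int) : Prop := out = flattened_space_unit_sizes_py_alt flattened_space
instance (flattened_space : List (String × List Int)) (out : (List (String × Int)) × Int) : Decidable (Spec_flattened_space_unit_sizes_py flattened_space out) := by unfold Spec_flattened_space_unit_sizes_py; infer_instance

-- ===== CLAIM (what is proved, stated in full; the proofs are below) =====
def Claim_equal_flattened_space_unit_sizes_py : Prop := ∀ (flattened_space : List (String × List Int)), Dom_flattened_space_unit_sizes_py flattened_space → Pre_flattened_space_unit_sizes_py flattened_space → Spec_flattened_space_unit_sizes_py flattened_space (flattened_space_unit_sizes_py flattened_space)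

-- ===== LEMMAS AND PROOFS =====

-- canonical value of A's fold: pvAux r p lists (key, running product) along r
def pvAux : List (String × List Int) → Int → List (String × Int)
  | [], _ => []
  | po :: t, p => (po.1, p) :: pvAux t (p * (po.2.length : Int))

theorem foldA_char (r : List (String × List Int)) (d : PySem.Dict String Int) (p : Int)
    (hfresh : ∀ a ∈ r, d.contains a.1 = false)
    (hnd : (r.map (fun q => q.1)).Nodup) :
    r.foldl (fun (st : PySem.Dict String Int × Int) (po : String × List Int) =>
        (st.1.insert po.1 st.2, st.2 * (po.2.length : Int))) (d, p)
      = (PySem.Dict.mk (d.items ++ pvAux r p), p * (r.map (fun q => (q.2.length : Int))).prod) := by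
  induction r generalizing d p with
  | nil => simp [pvAux]
  | cons a t ih =>
      simp only [List.foldl_cons, List.map_cons, List.nodup_cons] at *
      rw [ih _ _ ?_ hnd.2]
      · rw [PySem.Dict.items_insert_of_not_contains]
        · simp [pvAux, mul_assoc]
        · exact hfresh a List.mem_cons_self
      · intro b hb
        have hne : b.1 ≠ a.1 := fun h => hnd.1 (h ▸ (List.mem_map.mpr ⟨b, hb, rfl⟩))
        rw [PySem.Dict.contains_insert]
        simp [hne, hfresh b (List.mem_cons_of_mem a hb)]

-- product of the lengths of entries with key strictly above k (factor 1 elsewhere)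
def pvG (r : List (String × List Int)) (k : String) : Int :=
  (r.map (fun p => if k < p.1 then (p.2.length : Int) else 1)).prod

-- B's scan computes pvG
theorem foldl_if_mul (r : List (String × List Int)) (k : String) (q : Int) :
    r.foldl (fun acc p => if k < p.1 then acc * (p.2.length : Int) else acc) q
      = q * pvG r k := by
  induction r generalizing q with
  | nil => simp [pvG]
  | cons a t ih =>
      simp only [List.foldl_cons, pvG, List.map_cons, List.prod_cons] at *
      split_ifs with h <;> rw [ih] <;> ring_nf

theorem foldl_mul (r : List (String × List Int)) (q : Int) :
    r.foldl (fun acc p => acc * (p.2.length : Int)) q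
      = q * (r.map (fun p => (p.2.length : Int))).prod := by
  induction r generalizing q with
  | nil => simp
  | cons a t ih => simp [ih, mul_assoc]

-- pvG only depends on the multiset of entries
theorem pvG_perm {r r' : List (String × List Int)} (h : r.Perm r') (k : String) :
    pvG r k = pvG r' k :=
  (h.map _).prod_eq

theorem pvG_eq_one {r : List (String × List Int)} {k : String}
    (h : ∀ p ∈ r, ¬ k < p.1) : pvG r k = 1 := by
  apply List.prod_eq_one
  intro x hx
  rcases List.mem_map.mp hx with ⟨p, hp, rfl⟩
  rw [if_neg (h p hp)]

-- over a strictly key-descending list, the running product at each entry is pvG of that key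
theorem pvAux_descending (r : List (String × List Int))
    (hd : r.Pairwise (fun a b => b.1 < a.1)) (q : Int) :
    pvAux r q = r.map (fun e => (e.1, q * pvG r e.1)) := by
  induction r generalizing q with
  | nil => rfl
  | cons a t ih =>
      rcases List.pairwise_cons.mp hd with ⟨ha, ht⟩
      have hGa : pvG (a :: t) a.1 = 1 := by
        apply pvG_eq_one
        intro p hp
        rcases List.mem_cons.mp hp with h | h
        · rw [h]; exact lt_irrefl _
        · exact not_lt.mpr (le_of_lt (ha p h))
      simp only [pvAux, List.map_cons, hGa, mul_one]
      refine congrArg _ ?_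
      rw [ih ht]
      apply List.map_congr_left
      intro e he
      have hGe : pvG (a :: t) e.1 = (a.2.length : Int) * pvG t e.1 := by
        simp only [pvG, List.map_cons, List.prod_cons, if_pos (ha e he)]
      rw [hGe]
      ring_nf

-- ===== VERDICT (by name: the statement is the Claim_ definition above) =====
theorem flattened_space_unit_sizes_py_spec : Claim_equal_flattened_space_unit_sizes_py := by
  intro fs _ hpre
  unfold Spec_flattened_space_unit_sizes_py
  unfold flattened_space_unit_sizes_py flattened_space_unit_sizes_py_alt
  set s := PySem.List.sorted fs (fun p => p.1) false with hs
  have hperm : s.Perm fs := PySem.List.sorted_perm fs (fun p => p.1) false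
  have hnds : (s.map (fun q => q.1)).Nodup := ((hperm.map _).nodup_iff).mpr hpre
  have hlt : s.Pairwise (fun a b => a.1 < b.1) := by
    have hle : s.Pairwise (fun a b => a.1 ≤ b.1) :=
      PySem.List.sorted_pairwise fs (fun p => p.1)
    have hne : s.Pairwise (fun a b => a.1 ≠ b.1) := List.pairwise_map.mp hnds
    exact (hle.and hne).imp (fun h => lt_of_le_of_ne h.1 h.2)
  -- B's descending keys list is the reverse of the keys of s
  have hkeys : PySem.List.sorted (fs.map (fun p => p.1)) (fun k => k) true
      = (s.map (fun p => p.1)).reverse := by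
    apply PySem.List.sorted_rev_eq_of_perm_of_pairwise_gt
    · exact (List.reverse_perm _).trans (hperm.map _)
    · rw [List.pairwise_reverse]
      exact List.pairwise_map.mpr hlt
  have hdesc : s.reverse.Pairwise (fun a b => b.1 < a.1) := by
    rw [List.pairwise_reverse]; exact hlt
  have hA := foldA_char s.reverse PySem.Dict.empty 1
      (by intro a _; rfl)
      (by rw [List.map_reverse, List.nodup_reverse]; exact hnds)
  rw [hA]
  refine Prod.ext ?_ ?_
  · show PySem.Dict.items _ = _
    rw [pvAux_descending s.reverse hdesc 1, hkeys]
    have hmap : (s.map (fun p => p.1)).reverse.map (fun k => (k, pvUnitsAbove fs k))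
        = s.reverse.map (fun e => (e.1, 1 * pvG s.reverse e.1)) := by
      rw [← List.map_reverse, List.map_map]
      apply List.map_congr_left
      intro e _
      have : pvUnitsAbove fs e.1 = pvG s.reverse e.1 := by
        unfold pvUnitsAbove
        rw [foldl_if_mul, pvG_perm ((s.reverse_perm).trans hperm).symm e.1, one_mul]
      simp [Function.comp, this]
    rw [hmap]
    rfl
  · show 1 * _ = _
    rw [foldl_mul, one_mul, one_mul]
    exact ((s.reverse_perm.trans hperm).map _).prod_eq
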